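-- pv_equiv track=rewrite | github.com/stefan-ysh/image-grayscale-converter | main.py | get_resize_direction
-- ===== SOURCE A (Python) =====
-- def get_resize_direction(x, y, start, end, threshold=10):
--     corners = {
--         "top_left": start,
--         "top_right": (end[0], start[1]),
--         "bottom_left": (start[0], end[1]),
--         "bottom_right": end
--     }
--     for direction, (cx, cy) in corners.items():
--         if abs(x - cx) < threshold and abs(y - cy) < threshold:
--             return direction
--     return None
-- ===== SOURCE B (Python) =====
-- def get_resize_direction(x, y, start, end, threshold=10):
--     # Staged 1D search: pick the vertical band first, then a horizontal band,
--     # and assemble the corner name from the two axis labels.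
--     for v_name, cy in (("top", start[1]), ("bottom", end[1])):
--         if abs(y - cy) < threshold:
--             for h_name, cx in (("left", start[0]), ("right", end[0])):
--                 if abs(x - cx) < threshold:
--                     return v_name + "_" + h_name
--     return None
-- ===== Notes on version B (the rewrite author's own statement) =====
-- stated objective: alternative
-- what changed: Replaced the dict of four 2D corner points scanned for a combined 2D hit with two staged 1D searches (vertical band, then horizontal band) that assemble the corner name by concatenating the axis labels.
import Mathlib
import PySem

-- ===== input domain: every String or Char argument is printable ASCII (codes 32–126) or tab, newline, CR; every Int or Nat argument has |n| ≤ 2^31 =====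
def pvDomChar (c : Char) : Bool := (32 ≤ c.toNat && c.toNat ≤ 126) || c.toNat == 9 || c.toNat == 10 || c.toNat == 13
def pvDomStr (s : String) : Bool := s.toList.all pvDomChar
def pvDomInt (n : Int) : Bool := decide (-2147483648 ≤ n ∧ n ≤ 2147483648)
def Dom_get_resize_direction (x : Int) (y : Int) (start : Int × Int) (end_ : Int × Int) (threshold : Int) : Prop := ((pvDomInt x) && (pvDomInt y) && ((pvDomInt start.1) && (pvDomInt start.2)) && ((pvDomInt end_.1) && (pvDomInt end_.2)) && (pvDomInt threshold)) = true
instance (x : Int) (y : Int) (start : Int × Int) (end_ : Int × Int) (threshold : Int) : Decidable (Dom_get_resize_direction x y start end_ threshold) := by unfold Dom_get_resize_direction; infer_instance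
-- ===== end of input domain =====

-- B replaces the 2D scan over a dict of four corner points by two staged 1D axis searches that
-- assemble the corner name from the axis labels; objective: alternative decomposition, no speed claim.

-- ===== PORT A =====
-- loop over the corners dict's items, first match wins
def pvCornersLoop (x : Int) (y : Int) (threshold : Int) : List (String × (Int × Int)) → Option String
  | [] => none
  | (direction, (cx, cy)) :: rest =>
    if |x - cx| < threshold ∧ |y - cy| < threshold then some direction
    else pvCornersLoop x y threshold rest

def get_resize_direction (x : Int) (y : Int) (start : Int × Int) (end_ : Int × Int) (threshold : Int) : Option String :=
  let corners : List (String × (Int × Int)) :=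
    [("top_left", start), ("top_right", (end_.1, start.2)),
     ("bottom_left", (start.1, end_.2)), ("bottom_right", end_)]
  pvCornersLoop x y threshold corners

-- ===== PORT B =====
-- inner 1D search for the horizontal band
def pvHorizScan (x : Int) (threshold : Int) : List (String × Int) → Option String
  | [] => none
  | (h_name, cx) :: rest =>
    if |x - cx| < threshold then some (h_name) else pvHorizScan x threshold rest

-- outer 1D search for the vertical band; on a vertical hit, search horizontally and
-- concatenate the two axis labels; if no horizontal hit, continue with the next band
def pvVertScan (x : Int) (y : Int) (threshold : Int) (horiz : List (String × Int)) : List (String × Int) → Option String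
  | [] => none
  | (v_name, cy) :: rest =>
    if |y - cy| < threshold then
      match pvHorizScan x threshold horiz with
      | some h_name => some (v_name ++ "_" ++ h_name)
      | none => pvVertScan x y threshold horiz rest
    else pvVertScan x y threshold horiz rest

def get_resize_direction_alt (x : Int) (y : Int) (start : Int × Int) (end_ : Int × Int) (threshold : Int) : Option String :=
  pvVertScan x y threshold [("left", start.1), ("right", end_.1)]
    [("top", start.2), ("bottom", end_.2)]

-- ===== PRECONDITION & SPEC =====
def Spec_get_resize_direction (x : Int) (y : Int) (start : Int × Int) (end_ : Int × Int) (threshold : Int) (out : Option String) : Prop := out = get_resize_direction_alt x y start end_ threshold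
instance (x : Int) (y : Int) (start : Int × Int) (end_ : Int × Int) (threshold : Int) (out : Option String) : Decidable (Spec_get_resize_direction x y start end_ threshold out) := by unfold Spec_get_resize_direction; infer_instance

-- ===== CLAIM =====
def Claim_equal_get_resize_direction : Prop := ∀ (x : Int) (y : Int) (start : Int × Int) (end_ : Int × Int) (threshold : Int), Dom_get_resize_direction x y start end_ threshold → Spec_get_resize_direction x y start end_ threshold (get_resize_direction x y start end_ threshold)

-- ===== LEMMAS AND PROOFS =====

-- ===== VERDICT =====
theorem get_resize_direction_spec : Claim_equal_get_resize_direction := by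
  intro x y s e t _
  unfold Spec_get_resize_direction get_resize_direction get_resize_direction_alt
  simp only [pvCornersLoop, pvVertScan, pvHorizScan]
  split_ifs <;> simp_all
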